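-- pv_equiv track=rewrite | github.com/pendant-k/-problem-solving | 프로그래머스/unrated/120843. 공 던지기/공 던지기.py | solution
-- ===== SOURCE A (Python) =====
-- def solution(numbers, k):
--     current_idx = 0
--     # k번째로 공 던지는 사람 구하기 -> k번 실행
--     for order in range(k):
--         for t in range(2):
--             if current_idx == len(numbers) -1:
--                 current_idx = 0
--             else :
--                 current_idx +=1
--     return numbers[current_idx-2]
-- ===== SOURCE B (Python) =====
-- def solution(numbers, k):
--     # closed form: after k throws of +2 steps around the circle, the thrower is at (2k-2) mod n
--     return numbers[(2 * k - 2) % len(numbers)]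
-- ===== Notes on version B (the rewrite author's own statement) =====
-- stated objective: faster
-- what changed: replaces the k-iteration step-by-step circular walk with a single closed-form modular index (2*k-2) % len(numbers)
-- outside the precondition, e.g. on solution([1, 2, 3], -1): A returns 2, B returns 3
import Mathlib
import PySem

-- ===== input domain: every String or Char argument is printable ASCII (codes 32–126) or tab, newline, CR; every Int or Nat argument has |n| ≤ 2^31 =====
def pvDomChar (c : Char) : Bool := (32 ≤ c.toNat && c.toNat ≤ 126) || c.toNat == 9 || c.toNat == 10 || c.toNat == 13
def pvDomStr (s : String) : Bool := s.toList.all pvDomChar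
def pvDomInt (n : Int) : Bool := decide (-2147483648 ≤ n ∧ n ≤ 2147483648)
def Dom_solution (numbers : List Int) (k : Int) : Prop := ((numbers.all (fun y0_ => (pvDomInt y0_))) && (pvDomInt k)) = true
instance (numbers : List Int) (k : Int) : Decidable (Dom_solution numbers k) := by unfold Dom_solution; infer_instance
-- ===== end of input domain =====

-- B replaces A's O(k) step-by-step circular walk by the closed-form index (2k-2) % n (O(1), asymptotically faster).


-- ===== PORT A =====
-- one wrap-or-increment step of A's inner loop body
def stepA (n c : Int) : Int := if c = n - 1 then 0 else c + 1

def solution (numbers : List Int) (k : Int) : Int :=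
  let current :=
    (PySem.List.pyRange 0 k 1).foldl (fun cur _ =>
      (PySem.List.pyRange 0 2 1).foldl (fun c _ => stepA (numbers.length : Int) c) cur) 0
  (PySem.List.pyGet? numbers (current - 2)).getD 0

-- ===== PORT B =====
def solution_alt (numbers : List Int) (k : Int) : Int :=
  (PySem.List.pyGet? numbers (PySem.Int.mod (2 * k - 2) (numbers.length : Int))).getD 0

-- ===== PRECONDITION & SPEC =====
-- Pre_ excludes lists with fewer than 2 elements (A raises IndexError there) and negative k,
-- which lies outside the task's natural domain of throw counts (there A's value numbers[-2]
-- is just the untouched initial loop state).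
def Pre_solution (numbers : List Int) (k : Int) : Prop := 2 ≤ numbers.length ∧ 0 ≤ k
instance (numbers : List Int) (k : Int) : Decidable (Pre_solution numbers k) := by
  unfold Pre_solution; infer_instance
def pvWitness_solution : List Int × Int := ([10, 20, 30], 5)

def Spec_solution (numbers : List Int) (k : Int) (out : Int) : Prop := out = solution_alt numbers k
instance (numbers : List Int) (k : Int) (out : Int) : Decidable (Spec_solution numbers k out) := by
  unfold Spec_solution; infer_instance

-- ===== CLAIM (what is proved, stated in full; the proofs are below) =====
def Claim_equal_solution : Prop := ∀ (numbers : List Int) (k : Int), Dom_solution numbers k → Pre_solution numbers k → Spec_solution numbers k (solution numbers k)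

-- ===== LEMMAS AND PROOFS =====

-- a fold that ignores the list's elements is an iterate of its body
lemma foldl_const_iterate {α β : Type} (f : α → α) (l : List β) (c : α) :
    l.foldl (fun a _ => f a) c = f^[l.length] c := by
  induction l generalizing c with
  | nil => rfl
  | cons x xs ih => simp [List.foldl_cons, ih, Function.iterate_succ_apply]

lemma stepA_mod {n c : Int} (hn : 0 < n) (hc : 0 ≤ c) (hcn : c < n) :
    stepA n c = (c + 1) % n := by
  unfold stepA
  split_ifs with h
  · rw [h]
    simp
  · rw [Int.emod_eq_of_lt (by omega) (by omega)]

lemma iterate_stepA {n : Int} (hn : 0 < n) (m : Nat) :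
    (fun c => stepA n (stepA n c))^[m] 0 = (2 * m) % n := by
  induction m with
  | zero => simp
  | succ m ih =>
    rw [Function.iterate_succ_apply', ih]
    have h1 : 0 ≤ (2 * (m : Int)) % n := Int.emod_nonneg _ (by omega)
    have h2 : (2 * (m : Int)) % n < n := Int.emod_lt_of_pos _ hn
    rw [stepA_mod hn h1 h2]
    have h3 : 0 ≤ ((2 * (m : Int)) % n + 1) % n := Int.emod_nonneg _ (by omega)
    have h4 : ((2 * (m : Int)) % n + 1) % n < n := Int.emod_lt_of_pos _ hn
    rw [stepA_mod hn h3 h4, Int.emod_add_emod,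
        show (2 * (m : Int) % n + 1 + 1) = 2 * m % n + 2 by ring, Int.emod_add_emod]
    push_cast
    ring_nf

-- a negative in-range Python index reads the same element as its length-shifted counterpart
lemma pyGet?_neg_shift {α : Type} (xs : List α) (i : Int)
    (h1 : -(xs.length : Int) ≤ i) (h2 : i < 0) :
    PySem.List.pyGet? xs i = PySem.List.pyGet? xs (i + xs.length) := by
  simp only [PySem.List.pyGet?, PySem.List.pyIdx?]
  rw [if_neg (by omega), if_pos h1, if_pos (by omega : (0:Int) ≤ i + xs.length),
      if_pos (by omega : i + (xs.length : Int) < (xs.length : Int))]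
  have h3 : xs.length - (-i).toNat = (i + (xs.length : Int)).toNat := by omega
  rw [h3]

-- ===== VERDICT (by name: the statement is the Claim_ definition above) =====
theorem solution_spec : Claim_equal_solution := by
  intro numbers k _ hpre
  obtain ⟨hlen, hk⟩ := hpre
  unfold Spec_solution solution solution_alt
  set n : Int := (numbers.length : Int) with hn
  have hn2 : (2 : Int) ≤ n := by omega
  have body_eq : (fun (cur : Int) (_ : Int) =>
      (PySem.List.pyRange 0 2 1).foldl (fun c _ => stepA n c) cur)
      = (fun cur _ => stepA n (stepA n cur)) := by
    funext cur _
    rw [show PySem.List.pyRange 0 2 1 = [0, 1] from by decide]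
    rfl
  rw [body_eq, foldl_const_iterate, PySem.List.length_pyRange_one,
      iterate_stepA (by omega), show (((k - 0).toNat : Int)) = k by omega,
      PySem.Int.mod_eq_emod_of_pos (by omega)]
  set m := 2 * k % n with hm
  have hm0 : 0 ≤ m := Int.emod_nonneg _ (by omega)
  have hmn : m < n := Int.emod_lt_of_pos _ (by omega)
  have key : (2 * k - 2) % n = (m - 2) % n := by
    rw [Int.sub_emod, Int.sub_emod m 2 n, hm, Int.emod_emod_of_dvd (2 * k) dvd_rfl]
  by_cases hm2 : 2 ≤ m
  · rw [key, Int.emod_eq_of_lt (by omega) (by omega)]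
  · have hB : (m - 2) % n = m - 2 + n := by
      conv_lhs => rw [show m - 2 = (m - 2 + n) + -1 * n by ring]
      rw [Int.add_mul_emod_self_right]
      exact Int.emod_eq_of_lt (by omega) (by omega)
    rw [key, hB]
    show (PySem.List.pyGet? numbers (m - 2)).getD 0
        = (PySem.List.pyGet? numbers (m - 2 + n)).getD 0
    rw [pyGet?_neg_shift numbers (m - 2) (by omega) (by omega), ← hn]
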